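-- pv_equiv track=rewrite | github.com/ChewKinWhye/CS2220 | utils/assignment1/data.py | in_frame_three_gram
-- ===== SOURCE A (Python) =====
-- def in_frame_three_gram(row):
--     # Row contains 99 values, code can be reused for up or down stream
--     nucleotides = ['A', 'T', 'G', 'C']
--     three_grams = []
--     for i in nucleotides:
--         for ii in nucleotides:
--             for iii in nucleotides:
--                 three_gram = i + ii + iii
--                 three_grams.append(three_gram)
--     # three_grams now contains 4^3 values, AAA to CCC
--     # Initialise count with zeros
--     three_grams_count = [0] * 4**3
--     for idx in range(0, len(row), 3):
--         three_gram = row[idx] + row[idx+1] + row[idx+2]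
--         # Position will be 0 for AAA, 1 for AAT ... 63 for CCC
--         try:
--             position = three_grams.index(three_gram)
--             three_grams_count[position] += 1
--         except:
--             # three gram contains "N", ignore
--             pass
--     # Sum of all the values in three_grams_count will be 99/3 = 33, if no "N"s
--     return three_grams_count
-- ===== SOURCE B (Python) =====
-- def in_frame_three_gram(row):
--     # Two staged passes instead of A's incremental histogram: first build the
--     # list of in-frame codons, then compute each of the 64 bins independently
--     # as the number of codons equal to that gram (an invalid codon, e.g. one
--     # containing 'N', simply matches no gram).
--     codons = [row[i] + row[i + 1] + row[i + 2] for i in range(0, len(row), 3)]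
--     return [codons.count(a + b + c) for a in 'ATGC' for b in 'ATGC' for c in 'ATGC']
-- ===== Notes on version B (the rewrite author's own statement) =====
-- stated objective: alternative
-- what changed: B replaces A's single incremental pass (table lookup + in-place histogram update per codon, with try/except) by two staged passes: it first materialises the list of in-frame codons, then computes each of the 64 bins independently as codons.count(gram); an invalid codon simply matches no gram, so no try/except is needed.
import Mathlib
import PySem

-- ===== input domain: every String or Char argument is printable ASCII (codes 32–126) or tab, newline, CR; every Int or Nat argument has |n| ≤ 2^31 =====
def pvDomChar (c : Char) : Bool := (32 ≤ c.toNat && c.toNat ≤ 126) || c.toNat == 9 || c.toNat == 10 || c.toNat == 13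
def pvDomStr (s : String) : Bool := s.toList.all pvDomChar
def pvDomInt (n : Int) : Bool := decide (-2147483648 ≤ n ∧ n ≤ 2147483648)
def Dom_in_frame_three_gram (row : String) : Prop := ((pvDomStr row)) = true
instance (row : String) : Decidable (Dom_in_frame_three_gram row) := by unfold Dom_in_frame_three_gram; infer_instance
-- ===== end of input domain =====

-- B computes the same 64 in-frame codon counts by two staged passes (build the list of codons from the row
-- then count each of the 64 grams by equality) instead of A's single
-- incremental table-lookup histogram pass (objective: alternative).

-- ===== PORT A =====
-- Python strings are ported on the List Char side (PySem.Chars/Str); a one-char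
-- string row[idx] is a Char wrapped into the 3-char gram list, exact on every input.
def pvNucleotides : List (List Char) := [['A'], ['T'], ['G'], ['C']]

-- the three nested loops building three_grams (AAA … CCC), literal
def pvThreeGrams : List (List Char) :=
  pvNucleotides.foldl (fun tg i =>
    pvNucleotides.foldl (fun tg ii =>
      pvNucleotides.foldl (fun tg iii =>
        tg ++ [i ++ ii ++ iii]) tg) tg) []

-- one iteration of A's counting loop; the char lookups are pyGet? (none = IndexError,
-- which happens only outside Pre_ and is excluded there)
def pvStepA (row : String) (counts : List Int) (idx : Int) : List Int :=
  match PySem.Str.pyGet? row idx, PySem.Str.pyGet? row (idx+1), PySem.Str.pyGet? row (idx+2) with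
  | some a, some b, some c =>
    match PySem.List.index? pvThreeGrams ([a] ++ [b] ++ [c]) with
    | some position => counts.set position (counts.getD position 0 + 1)
    | none => counts          -- except: pass ('N' gram)
  | _, _, _ => counts         -- IndexError: outside Pre_
def in_frame_three_gram (row : String) : List Int :=
  (PySem.List.pyRange 0 (PySem.Str.len row) 3).foldl (pvStepA row) (List.replicate (4^3) 0)

-- ===== PORT B =====
-- row[i] + row[i+1] + row[i+2]: the same pyGet? lookups as A's (none = IndexError,
-- only outside Pre_, where the [] branch is never reached)
def pvCodon (row : String) (i : Int) : List Char :=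
  match PySem.Str.pyGet? row i, PySem.Str.pyGet? row (i+1), PySem.Str.pyGet? row (i+2) with
  | some a, some b, some c => [a] ++ [b] ++ [c]
  | _, _, _ => []           -- IndexError: outside Pre_
-- codons = [row[i] + row[i+1] + row[i+2] for i in range(0, len(row), 3)]
def pvCodons (row : String) : List (List Char) :=
  (PySem.List.pyRange 0 (PySem.Str.len row) 3).map (pvCodon row)
-- [codons.count(a+b+c) for a in 'ATGC' for b in 'ATGC' for c in 'ATGC']
def in_frame_three_gram_alt (row : String) : List Int :=
  "ATGC".toList.flatMap (fun a =>
    "ATGC".toList.flatMap (fun b =>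
      "ATGC".toList.map (fun c => (PySem.List.count (pvCodons row) [a, b, c] : Int))))

-- ===== PRECONDITION & SPEC =====
-- Pre_ excludes exactly the rows whose length is not a multiple of 3: there Python A
-- raises IndexError at the last partial codon (the indexing is outside its try).
def Pre_in_frame_three_gram (row : String) : Prop := row.toList.length % 3 = 0
instance (row : String) : Decidable (Pre_in_frame_three_gram row) := by unfold Pre_in_frame_three_gram; infer_instance
def pvWitness_in_frame_three_gram : String := "ATGNCA"

def Spec_in_frame_three_gram (row : String) (out : List Int) : Prop := out = in_frame_three_gram_alt row
instance (row : String) (out : List Int) : Decidable (Spec_in_frame_three_gram row out) := by unfold Spec_in_frame_three_gram; infer_instance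

-- ===== CLAIM (what is proved, stated in full; the proofs are below) =====
def Claim_equal_in_frame_three_gram : Prop := ∀ (row : String), Dom_in_frame_three_gram row → Pre_in_frame_three_gram row → Spec_in_frame_three_gram row (in_frame_three_gram row)

-- ===== LEMMAS AND PROOFS =====

-- A's per-codon step, re-expressed on the codon itself (proof-side helper)
def pvStep64 (counts : List Int) (g : List Char) : List Int :=
  match PySem.List.index? pvThreeGrams g with
  | some p => counts.set p (counts.getD p 0 + 1)
  | none => counts

theorem pvThreeGrams_nodup : pvThreeGrams.Nodup := by decide

-- applying A's step to the 64 per-gram counts of cs yields the counts of cs ++ [c]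
theorem step64_map (cs : List (List Char)) (c : List Char) :
    pvStep64 (pvThreeGrams.map (fun g => (PySem.List.count cs g : Int))) c
      = pvThreeGrams.map (fun g => (PySem.List.count (cs ++ [c]) g : Int)) := by
  unfold pvStep64
  cases h : PySem.List.index? pvThreeGrams c with
  | none =>
    have hnot : c ∉ pvThreeGrams := (PySem.List.index?_eq_none_iff _ _).mp h
    refine (List.map_congr_left ?_)
    intro g hg
    have hne : (c == g) = false := by
      apply Bool.eq_false_iff.mpr
      intro hbeq
      exact hnot ((beq_iff_eq.mp hbeq) ▸ hg)
    simp [PySem.List.count_eq, List.count_append, List.count_cons, hne]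
  | some p =>
    obtain ⟨hp, hgp, _⟩ := PySem.List.getElem_of_index?_eq_some h
    apply List.ext_getElem
    · simp
    · intro i hi1 hi2
      have hplen : p < (pvThreeGrams.map (fun g => (PySem.List.count cs g : Int))).length := by
        simpa using hp
      have hilen : i < pvThreeGrams.length := by simpa using hi2
      have hgetD : (pvThreeGrams.map (fun g => (PySem.List.count cs g : Int))).getD p 0
          = (PySem.List.count cs c : Int) := by
        rw [List.getD_eq_getElem _ _ hplen]
        simp [hgp]
      simp only [List.getElem_set, List.getElem_map, hgetD]
      by_cases hip : p = i
      · subst hip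
        simp [hgp, PySem.List.count_eq, List.count_append]
      · have hne : (c == pvThreeGrams[i]) = false := by
          apply Bool.eq_false_iff.mpr
          intro hbeq
          have hceq : c = pvThreeGrams[i] := beq_iff_eq.mp hbeq
          have : p = i := by
            apply (List.Nodup.getElem_inj_iff pvThreeGrams_nodup).mp
            rw [hgp, hceq]
          exact hip this
        simp [hip, PySem.List.count_eq, List.count_append, List.count_cons, hne]

-- folding A's step from the zero histogram computes B's per-gram counts
theorem foldl_step64 (cs : List (List Char)) :
    cs.foldl pvStep64 (List.replicate 64 0) = pvThreeGrams.map (fun g => (PySem.List.count cs g : Int)) := by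
  induction cs using List.reverseRecOn with
  | nil => decide
  | append_singleton cs c ih =>
    rw [List.foldl_append, List.foldl_cons, List.foldl_nil, ih, step64_map]

-- B's triple comprehension lists exactly the counts of A's 64 grams, in A's order
theorem alt_shape (row : String) :
    in_frame_three_gram_alt row = pvThreeGrams.map (fun g => (PySem.List.count (pvCodons row) g : Int)) := by
  rfl

-- A's step on an index is pvStep64 on the codon at that index (on EVERY index:
-- when a lookup is out of range both sides leave the histogram unchanged)
theorem stepA_eq_step64 (row : String) (counts : List Int) (i : Int) :
    pvStepA row counts i = pvStep64 counts (pvCodon row i) := by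
  unfold pvStepA pvStep64 pvCodon
  cases PySem.Str.pyGet? row i with
  | none => rfl
  | some a =>
  cases PySem.Str.pyGet? row (i+1) with
  | none => rfl
  | some b =>
  cases PySem.Str.pyGet? row (i+2) with
  | none => rfl
  | some c => rfl

-- ===== VERDICT (by name: the statement is the Claim_ definition above) =====
theorem in_frame_three_gram_spec : Claim_equal_in_frame_three_gram := by
  intro row _ _
  unfold Spec_in_frame_three_gram in_frame_three_gram
  rw [alt_shape, ← foldl_step64, show (4^3 : Nat) = 64 from rfl]
  unfold pvCodons
  rw [List.foldl_map]
  exact PySem.List.foldl_congr_mem _ _ _ _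
    (fun counts i _ => stepA_eq_step64 row counts i)
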